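-- pv_equiv track=rewrite | github.com/jcolinpatrick/kryptos | scripts/e_route_definitive.py | gen_row_major
-- ===== SOURCE A (Python) =====
-- def read_order_to_perm(grid, nrows, ncols, cell_order):
--     """Convert a reading order to a permutation (output[i] = input[perm[i]])."""
--     perm = []
--     for r, c in cell_order:
--         if 0 <= r < nrows and 0 <= c < ncols:
--             val = grid[r][c]
--             if val >= 0:
--                 perm.append(val)
--     return perm
--
-- def gen_row_major(grid, nrows, width, reverse_rows=False, reverse_cols=False):
--     """Row-major reading with optional reversals."""
--     order = []
--     row_range = range(nrows - 1, -1, -1) if reverse_rows else range(nrows)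
--     for r in row_range:
--         col_range = range(width - 1, -1, -1) if reverse_cols else range(width)
--         for c in col_range:
--             order.append((r, c))
--     return read_order_to_perm(grid, nrows, width, order)
-- ===== SOURCE B (Python) =====
-- def gen_row_major(grid, nrows, width, reverse_rows=False, reverse_cols=False):
--     """Always scan the grid forward in canonical row-major order, filtering each row
--     into its own list; then apply the reversals to the *results* (reverse each row's
--     filtered values, reverse the list of rows) and concatenate. Correct because
--     filtering commutes with reversing the traversal order."""
--     rows = []
--     for r in range(nrows):
--         rows.append([v for v in (grid[r][c] for c in range(width)) if v >= 0])
--     if reverse_cols: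
--         rows = [row[::-1] for row in rows]
--     if reverse_rows:
--         rows.reverse()
--     out = []
--     for row in rows:
--         out.extend(row)
--     return out
-- ===== Notes on version B (the rewrite author's own statement) =====
-- stated objective: alternative
-- what changed: A iterates in the possibly-reversed index order (step -1 ranges), builds an intermediate (r,c) coordinate list and rescans it with a bounds check; B always scans the grid forward in canonical row-major order building one filtered list per row, then applies the reversals to those result lists (reverse each row, reverse the row list) and concatenates, using that filtering commutes with reversal.
import Mathlib
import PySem

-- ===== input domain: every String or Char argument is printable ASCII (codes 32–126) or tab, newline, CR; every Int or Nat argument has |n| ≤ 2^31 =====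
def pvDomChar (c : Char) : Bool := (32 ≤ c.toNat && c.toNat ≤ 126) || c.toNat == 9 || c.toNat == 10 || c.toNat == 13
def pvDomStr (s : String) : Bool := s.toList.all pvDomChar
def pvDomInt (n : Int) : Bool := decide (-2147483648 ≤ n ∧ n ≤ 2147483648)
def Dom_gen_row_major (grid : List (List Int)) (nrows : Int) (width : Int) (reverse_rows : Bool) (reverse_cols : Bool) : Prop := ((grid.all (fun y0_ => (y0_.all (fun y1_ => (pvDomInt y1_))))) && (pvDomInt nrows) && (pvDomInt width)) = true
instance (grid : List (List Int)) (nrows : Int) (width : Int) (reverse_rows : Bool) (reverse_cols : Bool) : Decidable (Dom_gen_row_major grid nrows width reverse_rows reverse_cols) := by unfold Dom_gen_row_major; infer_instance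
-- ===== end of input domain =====

-- B scans the grid forward in canonical row-major order, filters each row into its own
-- list, and applies the reversals to the results instead of to the traversal; objective: alternative.

-- ===== PORT A =====
-- helper of A: read_order_to_perm (the foldl is the 'for r, c in cell_order' loop)
def read_order_to_perm (grid : List (List Int)) (nrows : Int) (ncols : Int)
    (cell_order : List (Int × Int)) : List Int :=
  cell_order.foldl (fun perm rc =>
    if 0 ≤ rc.1 ∧ rc.1 < nrows ∧ 0 ≤ rc.2 ∧ rc.2 < ncols then
      -- grid[r][c]; pyGet? = none would be Python's IndexError, excluded by Pre_
      let val : Int := (PySem.List.pyGet? ((PySem.List.pyGet? grid rc.1).getD []) rc.2).getD 0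
      if 0 ≤ val then perm ++ [val] else perm
    else perm) []

def gen_row_major (grid : List (List Int)) (nrows : Int) (width : Int) (reverse_rows : Bool) (reverse_cols : Bool) : List Int :=
  let row_range := if reverse_rows then PySem.List.pyRange (nrows - 1) (-1) (-1) else PySem.List.pyRange 0 nrows 1
  let order := row_range.foldl (fun order r =>
    let col_range := if reverse_cols then PySem.List.pyRange (width - 1) (-1) (-1) else PySem.List.pyRange 0 width 1
    col_range.foldl (fun order c => order ++ [(r, c)]) order) []
  read_order_to_perm grid nrows width order

-- ===== PORT B =====
-- grid[r][c] (pyGet? = none would be Python's IndexError, excluded by Pre_)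
def pvVal (grid : List (List Int)) (r c : Int) : Int :=
  (PySem.List.pyGet? ((PySem.List.pyGet? grid r).getD []) c).getD 0

def gen_row_major_alt (grid : List (List Int)) (nrows : Int) (width : Int) (reverse_rows : Bool) (reverse_cols : Bool) : List Int :=
  -- for r in range(nrows): rows.append([v for v ... if v >= 0])
  let rows := (PySem.List.pyRange 0 nrows 1).foldl (fun rows r =>
      rows ++ [(PySem.List.pyRange 0 width 1).filterMap (fun c =>
        let v := pvVal grid r c
        if 0 ≤ v then some v else none)]) []
  -- row[::-1] is exactly List.reverse
  let rows := if reverse_cols then rows.map (fun row => row.reverse) else rows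
  let rows := if reverse_rows then rows.reverse else rows
  -- out = []; for row in rows: out.extend(row)
  rows.foldl (fun out row => out ++ row) []

-- ===== PRECONDITION & SPEC =====
-- Pre_ excludes exactly the inputs where Python A raises IndexError (a visited row index
-- beyond len(grid), or a visited row shorter than width); both Pythons raise there.
def Pre_gen_row_major (grid : List (List Int)) (nrows : Int) (width : Int) (reverse_rows : Bool) (reverse_cols : Bool) : Prop :=
  nrows ≤ 0 ∨ width ≤ 0 ∨
    (nrows ≤ (grid.length : Int) ∧ ∀ row ∈ grid.take nrows.toNat, width ≤ (row.length : Int))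
instance (grid : List (List Int)) (nrows : Int) (width : Int) (reverse_rows : Bool) (reverse_cols : Bool) : Decidable (Pre_gen_row_major grid nrows width reverse_rows reverse_cols) := by unfold Pre_gen_row_major; infer_instance

def pvWitness_gen_row_major : List (List Int) × Int × Int × Bool × Bool :=
  ([[0, 1], [2, -1]], 2, 2, false, true)

def Spec_gen_row_major (grid : List (List Int)) (nrows : Int) (width : Int) (reverse_rows : Bool) (reverse_cols : Bool) (out : List Int) : Prop := out = gen_row_major_alt grid nrows width reverse_rows reverse_cols
instance (grid : List (List Int)) (nrows : Int) (width : Int) (reverse_rows : Bool) (reverse_cols : Bool) (out : List Int) : Decidable (Spec_gen_row_major grid nrows width reverse_rows reverse_cols out) := by unfold Spec_gen_row_major; infer_instance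

-- ===== CLAIM (what is proved, stated in full; the proofs are below) =====
def Claim_equal_gen_row_major : Prop := ∀ (grid : List (List Int)) (nrows : Int) (width : Int) (reverse_rows : Bool) (reverse_cols : Bool), Dom_gen_row_major grid nrows width reverse_rows reverse_cols → Pre_gen_row_major grid nrows width reverse_rows reverse_cols → Spec_gen_row_major grid nrows width reverse_rows reverse_cols (gen_row_major grid nrows width reverse_rows reverse_cols)

-- ===== LEMMAS AND PROOFS =====

-- the filter A applies cell by cell / B applies row by row
def pvG (grid : List (List Int)) (r c : Int) : Option Int :=
  if 0 ≤ pvVal grid r c then some (pvVal grid r c) else none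

lemma flatMap_congr_mem {α β : Type} (l : List α) (f g : α → List β)
    (h : ∀ x ∈ l, f x = g x) : l.flatMap f = l.flatMap g := by
  induction l with
  | nil => rfl
  | cons a l ih =>
      simp only [List.flatMap_cons]
      rw [h a (List.mem_cons_self), ih (fun x hx => h x (List.mem_cons_of_mem _ hx))]

lemma filterMap_flatMap {α β γ : Type} (l : List α) (g : α → List β) (f : β → Option γ) :
    (l.flatMap g).filterMap f = l.flatMap (fun a => (g a).filterMap f) := by
  induction l with
  | nil => rfl
  | cons a l ih => simp [List.flatMap_cons, List.filterMap_append, ih]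

lemma rop_eq_filterMap (grid : List (List Int)) (nrows ncols : Int) (order : List (Int × Int)) :
    read_order_to_perm grid nrows ncols order =
      order.filterMap (fun rc =>
        if 0 ≤ rc.1 ∧ rc.1 < nrows ∧ 0 ≤ rc.2 ∧ rc.2 < ncols then pvG grid rc.1 rc.2
        else none) := by
  unfold read_order_to_perm
  suffices h : ∀ (o : List (Int × Int)) (acc : List Int),
      o.foldl (fun perm rc =>
        if 0 ≤ rc.1 ∧ rc.1 < nrows ∧ rc.2 ≥ 0 ∧ rc.2 < ncols then
          let val : Int := (PySem.List.pyGet? ((PySem.List.pyGet? grid rc.1).getD []) rc.2).getD 0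
          if 0 ≤ val then perm ++ [val] else perm
        else perm) acc =
      acc ++ o.filterMap (fun rc =>
        if 0 ≤ rc.1 ∧ rc.1 < nrows ∧ 0 ≤ rc.2 ∧ rc.2 < ncols then pvG grid rc.1 rc.2
        else none) by
    simpa using h order []
  intro o
  induction o with
  | nil => intro acc; simp
  | cons rc o ih =>
      intro acc
      simp only [List.foldl_cons, List.filterMap_cons]
      by_cases hg : 0 ≤ rc.1 ∧ rc.1 < nrows ∧ 0 ≤ rc.2 ∧ rc.2 < ncols
      · by_cases hv : 0 ≤ (PySem.List.pyGet? ((PySem.List.pyGet? grid rc.1).getD []) rc.2).getD 0 <;>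
          simp [hg, hv, pvG, pvVal, ih]
      · simp [hg, pvG, pvVal, ih]

lemma order_eq_flatMap (R C : List Int) :
    R.foldl (fun order r => C.foldl (fun order c => order ++ [(r, c)]) order) [] =
      R.flatMap (fun r => C.map (fun c => (r, c))) := by
  have hinner : ∀ (r : Int) (acc : List (Int × Int)),
      C.foldl (fun order c => order ++ [(r, c)]) acc = acc ++ C.map (fun c => (r, c)) := by
    intro r acc
    exact PySem.List.foldl_append_singleton_eq_map (fun c => (r, c)) C acc
  calc R.foldl (fun order r => C.foldl (fun order c => order ++ [(r, c)]) order) []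
      = R.foldl (fun order r => order ++ C.map (fun c => (r, c))) [] := by
        exact PySem.List.foldl_congr_mem _ _ _ _ (fun acc r _ => hinner r acc)
    _ = [] ++ R.flatMap (fun r => C.map (fun c => (r, c))) :=
        PySem.List.foldl_append_eq_flatMap _ R []
    _ = _ := by simp

-- A's whole computation as a flatMap over the (maybe reversed) index lists
lemma a_as_flatMap (grid : List (List Int)) (nrows width : Int) (R C : List Int)
    (hR : ∀ r ∈ R, 0 ≤ r ∧ r < nrows) (hC : ∀ c ∈ C, 0 ≤ c ∧ c < width) :
    read_order_to_perm grid nrows width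
        (R.foldl (fun order r => C.foldl (fun order c => order ++ [(r, c)]) order) []) =
      R.flatMap (fun r => C.filterMap (pvG grid r)) := by
  rw [order_eq_flatMap, rop_eq_filterMap, filterMap_flatMap]
  apply flatMap_congr_mem
  intro r hr
  rw [List.filterMap_map]
  apply List.filterMap_congr
  intro c hc
  have h1 := hR r hr
  have h2 := hC c hc
  simp only [Function.comp]
  rw [if_pos ⟨h1.1, h1.2, h2.1, h2.2⟩]

lemma range_bounds (n : Int) (reverse : Bool) :
    ∀ x ∈ (if reverse then (PySem.List.pyRange 0 n 1).reverse else PySem.List.pyRange 0 n 1),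
      0 ≤ x ∧ x < n := by
  intro x hx
  cases reverse <;> exact PySem.List.mem_pyRange_one.mp (by simpa using hx)

lemma rev_range_eq (n : Int) :
    PySem.List.pyRange (n - 1) (-1) (-1) = (PySem.List.pyRange 0 n 1).reverse := by
  rw [PySem.List.pyRange_neg_one_eq_reverse]
  norm_num

lemma foldl_append_flatten {α : Type} (l : List (List α)) (acc : List α) :
    l.foldl (fun out row => out ++ row) acc = acc ++ l.flatten := by
  induction l generalizing acc with
  | nil => simp
  | cons a l ih => simp [ih, List.append_assoc]

lemma flatMap_eq_flatten_map {α β : Type} (l : List α) (f : α → List β) :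
    l.flatMap f = (l.map f).flatten := by
  induction l with
  | nil => rfl
  | cons a l ih => simp [List.flatMap_cons, ih]

-- ===== VERDICT (by name: the statement is the Claim_ definition above) =====
theorem gen_row_major_spec : Claim_equal_gen_row_major := by
  intro grid nrows width reverse_rows reverse_cols _ _
  unfold Spec_gen_row_major gen_row_major gen_row_major_alt
  simp only []
  -- A's side: rewrite the step -1 ranges as reversed ascending ranges, then flatten it
  rw [show (if reverse_rows then PySem.List.pyRange (nrows - 1) (-1) (-1) else PySem.List.pyRange 0 nrows 1)
      = (if reverse_rows then (PySem.List.pyRange 0 nrows 1).reverse else PySem.List.pyRange 0 nrows 1) by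
      cases reverse_rows <;> simp [rev_range_eq]]
  rw [show (fun (order : List (Int × Int)) (r : Int) =>
        (if reverse_cols then PySem.List.pyRange (width - 1) (-1) (-1) else PySem.List.pyRange 0 width 1).foldl
          (fun order c => order ++ [(r, c)]) order)
      = (fun (order : List (Int × Int)) (r : Int) =>
        (if reverse_cols then (PySem.List.pyRange 0 width 1).reverse else PySem.List.pyRange 0 width 1).foldl
          (fun order c => order ++ [(r, c)]) order) by
      cases reverse_cols <;> simp [rev_range_eq]]
  rw [a_as_flatMap grid nrows width _ _ (range_bounds nrows reverse_rows) (range_bounds width reverse_cols)]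
  -- B's side: the building foldl is a map, the concatenating foldl is flatten
  rw [show ((PySem.List.pyRange 0 nrows 1).foldl (fun rows r =>
        rows ++ [(PySem.List.pyRange 0 width 1).filterMap (fun c =>
          let v := pvVal grid r c
          if 0 ≤ v then some v else none)]) [])
      = (PySem.List.pyRange 0 nrows 1).map (fun r => (PySem.List.pyRange 0 width 1).filterMap (pvG grid r)) by
      simpa [pvG] using PySem.List.foldl_append_singleton_eq_map
        (fun r => (PySem.List.pyRange 0 width 1).filterMap (fun c =>
          let v := pvVal grid r c
          if 0 ≤ v then some v else none)) (PySem.List.pyRange 0 nrows 1) []]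
  rw [foldl_append_flatten]
  -- commute the reversals with the per-row filter and the row map
  cases reverse_cols <;> cases reverse_rows <;>
    simp [flatMap_eq_flatten_map, List.filterMap_reverse, List.map_reverse, Function.comp_def]
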